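-- pv_equiv track=rewrite | github.com/CraigVG/roman-letters-network | scripts/extract_recipients_v2.py | looks_like_name
-- ===== SOURCE A (Python) =====
-- NOISE_WORDS = {
--     'which', 'that', 'this', 'what', 'where', 'when', 'although', 'because',
--     'however', 'therefore', 'moreover', 'concerning', 'regarding', 'about',
--     'will', 'would', 'could', 'should', 'have', 'been', 'were', 'being',
--     'request', 'letter', 'epistle', 'write', 'written', 'send', 'sent',
--     'formula', 'senate', 'people', 'brethren', 'congregation', 'faithful',
-- }
--
-- def looks_like_name(name: str) -> bool:
--     if not name or len(name) < 2 or len(name) > 80: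
--         return False
--     lower = name.lower()
--     for w in NOISE_WORDS:
--         if f' {w} ' in f' {lower} ':
--             return False
--     if not (name[0].isupper() or name[0].isdigit()):
--         return False
--     if name == name.lower():
--         return False
--     # Reject if it looks like a whole sentence
--     if len(name.split()) > 4:
--         return False
--     return True
-- ===== SOURCE B (Python) =====
-- NOISE_WORDS = {
--     'which', 'that', 'this', 'what', 'where', 'when', 'although', 'because',
--     'however', 'therefore', 'moreover', 'concerning', 'regarding', 'about',
--     'will', 'would', 'could', 'should', 'have', 'been', 'were', 'being',
--     'request', 'letter', 'epistle', 'write', 'written', 'send', 'sent',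
--     'formula', 'senate', 'people', 'brethren', 'congregation', 'faithful',
-- }
--
-- def looks_like_name(name: str) -> bool:
--     # single character-level pass: a small state machine that simultaneously
--     # counts whitespace-separated words, detects any cased (upper) character,
--     # and checks each single-space-delimited token against the noise vocabulary
--     if not (2 <= len(name) <= 80):
--         return False
--     words = 0
--     in_word = False
--     cased = False
--     token = []
--     noisy = False
--     for ch in name:
--         if ch.isspace():
--             in_word = False
--         elif not in_word:
--             in_word = True
--             words += 1
--         if ch == ' ':
--             if ''.join(token).lower() in NOISE_WORDS:
--                 noisy = True
--             token = []
--         else: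
--             token.append(ch)
--         if ch != ch.lower():
--             cased = True
--     if ''.join(token).lower() in NOISE_WORDS:
--         noisy = True
--     return ((name[0].isupper() or name[0].isdigit())
--             and cased and words <= 4 and not noisy)
-- ===== Notes on version B (the rewrite author's own statement) =====
-- stated objective: alternative
-- what changed: A's staged string-level operations (lowercase the whole name, scan every noise word as a padded substring, split twice) are replaced by a single character-level state-machine pass that simultaneously counts whitespace-separated words, detects a cased character, and checks each single-space-delimited token against the noise vocabulary as it is completed.
import Mathlib
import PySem

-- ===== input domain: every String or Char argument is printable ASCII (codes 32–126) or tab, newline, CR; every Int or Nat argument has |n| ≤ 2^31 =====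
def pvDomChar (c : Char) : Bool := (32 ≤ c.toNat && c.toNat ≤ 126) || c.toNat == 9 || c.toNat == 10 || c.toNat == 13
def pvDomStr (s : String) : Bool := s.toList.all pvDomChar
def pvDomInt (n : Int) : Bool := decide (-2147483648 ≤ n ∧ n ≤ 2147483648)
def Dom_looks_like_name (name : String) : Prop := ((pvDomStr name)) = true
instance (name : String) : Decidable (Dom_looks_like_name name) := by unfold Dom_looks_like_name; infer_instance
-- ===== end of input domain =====

-- B replaces A's staged string-level operations (lower the whole name, scan each
-- noise word as a padded substring, split twice) by ONE character-level state-machine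
-- pass that counts words, detects a cased character and checks each single-space
-- token against the noise set as it is completed. Same return value on Dom.

-- ===== PORT A =====
-- NOISE_WORDS (a Python set of fixed string literals; the loop's result does not
-- depend on iteration order, we keep the source order)
def pvNoise : List String :=
  ["which", "that", "this", "what", "where", "when", "although", "because",
   "however", "therefore", "moreover", "concerning", "regarding", "about",
   "will", "would", "could", "should", "have", "been", "were", "being",
   "request", "letter", "epistle", "write", "written", "send", "sent",
   "formula", "senate", "people", "brethren", "congregation", "faithful"]

def looks_like_name (name : String) : Bool :=
  let s := name.toList
  if s.isEmpty || decide (s.length < 2) || decide (s.length > 80) then false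
  else
    let lower := PySem.Chars.lower s
    -- for w in NOISE_WORDS: if f' {w} ' in f' {lower} ': return False
    if pvNoise.any (fun w => PySem.Chars.isIn (' ' :: w.toList ++ [' ']) (' ' :: lower ++ [' '])) then false
    else
      match s with
      | [] => false  -- unreachable: name[0] on the nonempty string
      | c :: _ =>
        if !(PySem.Chars.isupper c || PySem.Chars.isdigit c) then false
        else if decide (s = lower) then false
        else if decide ((PySem.Chars.split₀ s).length > 4) then false
        else true

-- ===== PORT B =====
-- NOISE_WORDS as a PySem set of char lists (its elements are distinct literals)
def pvNoiseSet : PySem.Set (List Char) := PySem.Set.ofList (pvNoise.map String.toList)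

-- state: (words, in_word, cased, token, noisy) — one step of Source B's loop body
def pvStep (st : Nat × Bool × Bool × List Char × Bool) (c : Char) :
    Nat × Bool × Bool × List Char × Bool :=
  let (words, inw, cased, tok, noisy) := st
  let (words, inw) :=
    if PySem.Chars.isspace c then (words, false)
    else if !inw then (words + 1, true) else (words, inw)
  let (tok, noisy) :=
    if c == ' ' then
      ([], noisy || PySem.Set.contains pvNoiseSet (PySem.Chars.lower tok))
    else (tok ++ [c], noisy)
  let cased := if decide (c ≠ PySem.Chars.lowerChar c) then true else cased
  (words, inw, cased, tok, noisy)

def looks_like_name_alt (name : String) : Bool :=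
  let s := name.toList
  if !(decide (2 ≤ s.length) && decide (s.length ≤ 80)) then false
  else
    let st := s.foldl pvStep (0, false, false, [], false)
    let words := st.1
    let cased := st.2.2.1
    let tok := st.2.2.2.1
    let noisy := st.2.2.2.2 || PySem.Set.contains pvNoiseSet (PySem.Chars.lower tok)
    let first : Bool :=
      match PySem.List.pyGet? s 0 with
      | some c => PySem.Chars.isupper c || PySem.Chars.isdigit c
      | none => false
    first && cased && decide (words ≤ 4) && !noisy

-- ===== PRECONDITION & SPEC =====
def Spec_looks_like_name (name : String) (out : Bool) : Prop := out = looks_like_name_alt name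
instance (name : String) (out : Bool) : Decidable (Spec_looks_like_name name out) := by unfold Spec_looks_like_name; infer_instance

-- ===== CLAIM (what is proved, stated in full; the proofs are below) =====
def Claim_equal_looks_like_name : Prop := ∀ (name : String), Dom_looks_like_name name → Spec_looks_like_name name (looks_like_name name)

-- ===== LEMMAS AND PROOFS =====

-- Reference single-space split, structurally recursive.
def pvSplit : List Char → List (List Char)
  | [] => [[]]
  | c :: r =>
    if c = ' ' then [] :: pvSplit r
    else
      match pvSplit r with
      | [] => [[c]]
      | t :: ts => (c :: t) :: ts

theorem pvSplit_ne_nil (s : List Char) : pvSplit s ≠ [] := by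
  induction s with
  | nil => simp [pvSplit]
  | cons c r ih =>
    unfold pvSplit
    split <;> simp
    split <;> simp

theorem pvSplit_of_no_space {w : List Char} (hw : ' ' ∉ w) : pvSplit w = [w] := by
  induction w with
  | nil => rfl
  | cons c r ih =>
    simp only [List.mem_cons, not_or] at hw
    unfold pvSplit
    rw [if_neg (fun h => hw.1 h.symm), ih hw.2]

theorem pvSplit_append_space (x y : List Char) :
    pvSplit (x ++ ' ' :: y) = pvSplit x ++ pvSplit y := by
  induction x with
  | nil => simp [pvSplit]
  | cons c r ih =>
    by_cases hc : c = ' '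
    · simp [pvSplit, hc, ih]
    · simp only [List.cons_append]
      unfold pvSplit
      rw [if_neg hc, if_neg hc, ih]
      rcases h : pvSplit r with _ | ⟨t, ts⟩
      · exact absurd h (pvSplit_ne_nil r)
      · simp only [List.cons_append]; rw [pvSplit.eq_def]

-- decomposition of s around an occurrence of w as a space-delimited token
def pvDcmp (w s : List Char) : Prop :=
  ∃ a b, s = a ++ w ++ b ∧ (a = [] ∨ ∃ a₀, a = a₀ ++ [' ']) ∧ (b = [] ∨ ∃ b₀, b = ' ' :: b₀)

theorem mem_pvSplit_self {w b : List Char} (hw : ' ' ∉ w)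
    (hb : b = [] ∨ ∃ b₀, b = ' ' :: b₀) : w ∈ pvSplit (w ++ b) := by
  rcases hb with rfl | ⟨b₀, rfl⟩
  · simp [pvSplit_of_no_space hw]
  · rw [pvSplit_append_space, pvSplit_of_no_space hw]
    simp

theorem mem_pvSplit_of_pvDcmp {w s : List Char} (hw : ' ' ∉ w) (h : pvDcmp w s) :
    w ∈ pvSplit s := by
  rcases h with ⟨a, b, rfl, ha, hb⟩
  rcases ha with rfl | ⟨a₀, rfl⟩
  · simpa using mem_pvSplit_self hw hb
  · have he : a₀ ++ [' '] ++ w ++ b = a₀ ++ ' ' :: (w ++ b) := by simp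
    rw [he, pvSplit_append_space]
    exact List.mem_append_right _ (mem_pvSplit_self hw hb)

theorem pvSplit_head (r : List Char) :
    ∃ t ts b, pvSplit r = t :: ts ∧ r = t ++ b ∧ (b = [] ∨ ∃ b₀, b = ' ' :: b₀) := by
  induction r with
  | nil => exact ⟨[], [], [], rfl, rfl, Or.inl rfl⟩
  | cons c r' ih =>
    by_cases hc : c = ' '
    · subst hc
      exact ⟨[], pvSplit r', ' ' :: r', by simp [pvSplit], rfl, Or.inr ⟨r', rfl⟩⟩
    · obtain ⟨t, ts, b, h1, h2, h3⟩ := ih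
      refine ⟨c :: t, ts, b, ?_, by simp [h2], h3⟩
      unfold pvSplit
      rw [if_neg hc, h1]

theorem pvSplit_mem_dcmp : ∀ (n : Nat) (s : List Char), s.length ≤ n →
    (∀ w ∈ pvSplit s, pvDcmp w s) ∧
    (∀ w ∈ (pvSplit s).tail, ∃ a b, s = a ++ w ++ b ∧ (∃ a₀, a = a₀ ++ [' ']) ∧
        (b = [] ∨ ∃ b₀, b = ' ' :: b₀)) := by
  intro n
  induction n with
  | zero =>
    intro s hs
    have : s = [] := by cases s <;> simp_all
    subst this
    constructor
    · intro w hw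
      simp [pvSplit] at hw
      exact ⟨[], [], by simp [hw], Or.inl rfl, Or.inl rfl⟩
    · intro w hw
      simp [pvSplit] at hw
  | succ n ih =>
    intro s hs
    cases s with
    | nil =>
      constructor
      · intro w hw
        simp [pvSplit] at hw
        exact ⟨[], [], by simp [hw], Or.inl rfl, Or.inl rfl⟩
      · intro w hw
        simp [pvSplit] at hw
    | cons c r =>
      have hr : r.length ≤ n := by simpa using hs
      by_cases hc : c = ' '
      · subst hc
        have hsp : pvSplit (' ' :: r) = [] :: pvSplit r := by simp [pvSplit]
        constructor
        · intro w hw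
          rw [hsp, List.mem_cons] at hw
          rcases hw with rfl | hw
          · exact ⟨[], ' ' :: r, by simp, Or.inl rfl, Or.inr ⟨r, rfl⟩⟩
          · obtain ⟨a, b, rfl, ha, hb⟩ := (ih r hr).1 w hw
            refine ⟨' ' :: a, b, by simp, Or.inr ?_, hb⟩
            rcases ha with rfl | ⟨a₀, rfl⟩
            · exact ⟨[], rfl⟩
            · exact ⟨' ' :: a₀, rfl⟩
        · intro w hw
          rw [hsp, List.tail_cons] at hw
          obtain ⟨a, b, rfl, ha, hb⟩ := (ih r hr).1 w hw
          refine ⟨' ' :: a, b, by simp, ?_, hb⟩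
          rcases ha with rfl | ⟨a₀, rfl⟩
          · exact ⟨[], rfl⟩
          · exact ⟨' ' :: a₀, rfl⟩
      · obtain ⟨t, ts, b, h1, h2, h3⟩ := pvSplit_head r
        have hsplit : pvSplit (c :: r) = (c :: t) :: ts := by
          unfold pvSplit; rw [if_neg hc, h1]
        have htail : ts = (pvSplit r).tail := by simp [h1]
        constructor
        · intro w hw
          rw [hsplit] at hw
          rcases List.mem_cons.mp hw with rfl | hw
          · exact ⟨[], b, by simp [h2], Or.inl rfl, h3⟩
          · rw [htail] at hw
            obtain ⟨a, b', rfl, ⟨a₀, rfl⟩, hb⟩ := (ih r hr).2 w hw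
            exact ⟨c :: (a₀ ++ [' ']), b', by simp, Or.inr ⟨c :: a₀, by simp⟩, hb⟩
        · intro w hw
          rw [hsplit, List.tail_cons, htail] at hw
          obtain ⟨a, b', rfl, ⟨a₀, rfl⟩, hb⟩ := (ih r hr).2 w hw
          exact ⟨c :: (a₀ ++ [' ']), b', by simp, ⟨c :: a₀, by simp⟩, hb⟩

theorem pvDcmp_of_mem_pvSplit {w s : List Char} (h : w ∈ pvSplit s) : pvDcmp w s :=
  (pvSplit_mem_dcmp s.length s le_rfl).1 w h

theorem infix_iff_pvDcmp (w s : List Char) :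
    ((' ' :: w ++ [' ']) <:+: (' ' :: s ++ [' '])) ↔ pvDcmp w s := by
  constructor
  · rintro ⟨u, v, h⟩
    cases u with
    | nil =>
      simp only [List.nil_append, List.cons_append] at h
      have h' : w ++ [' '] ++ v = s ++ [' '] := by
        have := List.cons.injEq ' ' (w ++ [' '] ++ v) ' ' (s ++ [' ']) ▸ h
        simpa using h
      rcases v.eq_nil_or_concat with rfl | ⟨v₀, x, rfl⟩
      <;> simp only [List.concat_eq_append] at h' ⊢
      · simp only [List.append_nil] at h'
        have := (List.append_inj' h' rfl).1
        exact ⟨[], [], by simp [this], Or.inl rfl, Or.inl rfl⟩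
      · rw [show w ++ [' '] ++ (v₀ ++ [x]) = (w ++ [' '] ++ v₀) ++ [x] by simp] at h'
        obtain ⟨h1, h2⟩ := List.append_inj' h' rfl
        exact ⟨[], ' ' :: v₀, by simp [← h1], Or.inl rfl, Or.inr ⟨v₀, rfl⟩⟩
    | cons c u' =>
      simp only [List.cons_append] at h
      have hc : c = ' ' := (List.cons.injEq c _ ' ' _).mp h |>.1
      subst hc
      have h' : u' ++ (' ' :: w ++ [' ']) ++ v = s ++ [' '] := by
        have := (List.cons.injEq ' ' _ ' ' _).mp h |>.2
        simpa using this
      rcases v.eq_nil_or_concat with rfl | ⟨v₀, x, rfl⟩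
      <;> simp only [List.concat_eq_append] at h' ⊢
      · rw [show u' ++ (' ' :: w ++ [' ']) ++ [] = (u' ++ ' ' :: w) ++ [' '] by simp] at h'
        have h1 := (List.append_inj' h' rfl).1
        exact ⟨u' ++ [' '], [], by simp [← h1], Or.inr ⟨u', rfl⟩, Or.inl rfl⟩
      · rw [show u' ++ (' ' :: w ++ [' ']) ++ (v₀ ++ [x]) = (u' ++ ' ' :: w ++ ' ' :: v₀) ++ [x] by simp] at h'
        have h1 := (List.append_inj' h' rfl).1
        refine ⟨u' ++ [' '], ' ' :: v₀, by simp [← h1], Or.inr ⟨u', rfl⟩, Or.inr ⟨v₀, rfl⟩⟩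
  · rintro ⟨a, b, rfl, ha, hb⟩
    rcases ha with rfl | ⟨a₀, rfl⟩ <;> rcases hb with rfl | ⟨b₀, rfl⟩
    · exact ⟨[], [], by simp⟩
    · exact ⟨[], b₀ ++ [' '], by simp⟩
    · exact ⟨' ' :: a₀, [], by simp⟩
    · exact ⟨' ' :: a₀, b₀ ++ [' '], by simp⟩

theorem isIn_padded_iff {w s : List Char} (hw : ' ' ∉ w) :
    PySem.Chars.isIn (' ' :: w ++ [' ']) (' ' :: s ++ [' ']) = true ↔ w ∈ pvSplit s := by
  rw [PySem.Chars.isIn_iff_infix, infix_iff_pvDcmp]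
  exact ⟨mem_pvSplit_of_pvDcmp hw, pvDcmp_of_mem_pvSplit⟩

-- lowering distributes over the single-space split
theorem upper_bounds (c : Char) (h : PySem.Chars.isupper c = true) :
    65 ≤ c.toNat ∧ c.toNat ≤ 90 := by
  simp only [PySem.Chars.isupper, Bool.and_eq_true, decide_eq_true_eq] at h
  obtain ⟨ha, hb⟩ := h
  rw [Char.le_def, UInt32.le_iff_toNat_le] at ha hb
  exact ⟨ha, hb⟩

theorem lowerChar_ne_space (c : Char) (h : PySem.Chars.isupper c = true) :
    PySem.Chars.lowerChar c ≠ ' ' := by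
  intro hsp
  obtain ⟨ha, hb⟩ := upper_bounds c h
  have h32 : (PySem.Chars.lowerChar c).toNat = 32 := by rw [hsp]; rfl
  rw [PySem.Chars.lowerChar, if_pos h] at h32
  rw [Char.toNat_ofNat, if_pos (Or.inl (by omega))] at h32
  omega

theorem lowerChar_eq_space_iff (c : Char) : PySem.Chars.lowerChar c = ' ' ↔ c = ' ' := by
  constructor
  · intro h
    by_cases hu : PySem.Chars.isupper c = true
    · exact absurd h (lowerChar_ne_space c hu)
    · rw [PySem.Chars.lowerChar, if_neg hu] at h; exact h
  · intro h; subst h; rfl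

theorem pvSplit_lower (s : List Char) :
    pvSplit (PySem.Chars.lower s) = (pvSplit s).map PySem.Chars.lower := by
  induction s with
  | nil => rfl
  | cons c r ih =>
    show pvSplit (PySem.Chars.lowerChar c :: PySem.Chars.lower r) = _
    by_cases hc : c = ' '
    · subst hc
      rw [pvSplit.eq_def]
      simp [pvSplit, ih]
      rfl
    · have hc' : PySem.Chars.lowerChar c ≠ ' ' := fun h => hc ((lowerChar_eq_space_iff c).mp h)
      rw [pvSplit.eq_def]
      simp only [hc', ite_false]
      rw [ih]
      rcases h : pvSplit r with _ | ⟨t, ts⟩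
      · exact absurd h (pvSplit_ne_nil r)
      · unfold pvSplit
        rw [if_neg hc, h]
        simp [PySem.Chars.lower]

-- word counting: reference count with an "inside a word" flag
def pvWc : List Char → Bool → Nat
  | [], _ => 0
  | c :: r, inw =>
    if PySem.Chars.isspace c then pvWc r false
    else if inw then pvWc r true else 1 + pvWc r true

theorem split₀_go_length : ∀ (s cur : List Char) (acc : List (List Char)),
    (PySem.Chars.split₀.go s cur acc).length =
      acc.length + (if cur.isEmpty then 0 else 1) + pvWc s (!cur.isEmpty) := by
  intro s
  induction s with
  | nil =>
    intro cur acc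
    cases cur <;> simp [PySem.Chars.split₀.go, pvWc]
  | cons c r ih =>
    intro cur acc
    rw [PySem.Chars.split₀.go]
    by_cases hsp : PySem.Chars.isspace c = true
    · rw [if_pos hsp]
      cases cur with
      | nil => rw [if_pos (by simp)]; rw [ih]; simp [pvWc, hsp]
      | cons x xs =>
        rw [if_neg (by simp)]; rw [ih]; simp [pvWc, hsp]
    · rw [if_neg hsp, ih]
      cases cur with
      | nil => simp [pvWc, hsp]; omega
      | cons x xs => simp [pvWc, hsp]

theorem split₀_length (s : List Char) :
    (PySem.Chars.split₀ s).length = pvWc s false := by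
  have := split₀_go_length s [] []
  simpa [PySem.Chars.split₀] using this

-- the word-count component of B's fold
theorem fold_words : ∀ (s : List Char) (st : Nat × Bool × Bool × List Char × Bool),
    (s.foldl pvStep st).1 = st.1 + pvWc s st.2.1 := by
  intro s
  induction s with
  | nil => intro st; simp [pvWc]
  | cons c r ih =>
    intro st
    rw [List.foldl_cons, ih]
    obtain ⟨w, inw, cased, tok, nz⟩ := st
    by_cases hsp : PySem.Chars.isspace c = true
    · simp [pvStep, hsp, pvWc]
    · cases inw with
      | false => simp [pvStep, hsp, pvWc]; omega
      | true => simp [pvStep, hsp, pvWc]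

-- the cased component of B's fold
theorem fold_cased : ∀ (s : List Char) (st : Nat × Bool × Bool × List Char × Bool),
    (s.foldl pvStep st).2.2.1 =
      (st.2.2.1 || s.any (fun c => decide (c ≠ PySem.Chars.lowerChar c))) := by
  intro s
  induction s with
  | nil => intro st; simp
  | cons c r ih =>
    intro st
    rw [List.foldl_cons, ih]
    obtain ⟨w, inw, cased, tok, nz⟩ := st
    by_cases hc : c = PySem.Chars.lowerChar c
    · simp [pvStep, ← hc]
    · simp [pvStep, hc]

-- s == s.lower() iff no character is cased
theorem cased_iff (s : List Char) :
    s.any (fun c => decide (c ≠ PySem.Chars.lowerChar c)) = !decide (s = PySem.Chars.lower s) := by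
  induction s with
  | nil => simp [PySem.Chars.lower]
  | cons c r ih =>
    show _ = !decide (c :: r = PySem.Chars.lowerChar c :: PySem.Chars.lower r)
    rw [List.any_cons, ih]
    by_cases hc : c = PySem.Chars.lowerChar c
    · simp [← hc]
    · simp [hc]

-- the noise component of B's fold, with the final-token flush applied
theorem fold_noise : ∀ (s : List Char) (st : Nat × Bool × Bool × List Char × Bool),
    ' ' ∉ st.2.2.2.1 →
    ((s.foldl pvStep st).2.2.2.2 ||
        PySem.Set.contains pvNoiseSet (PySem.Chars.lower (s.foldl pvStep st).2.2.2.1)) =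
      (st.2.2.2.2 || (pvSplit (st.2.2.2.1 ++ s)).any
        (fun t => PySem.Set.contains pvNoiseSet (PySem.Chars.lower t))) := by
  intro s
  induction s with
  | nil =>
    intro st htok
    simp [pvSplit_of_no_space htok]
  | cons c r ih =>
    intro st htok
    obtain ⟨w, inw, cased, tok, nz⟩ := st
    simp only at htok
    rw [List.foldl_cons]
    by_cases hc : c = ' '
    · subst hc
      have hstep : pvStep (w, inw, cased, tok, nz) ' ' =
          ((if PySem.Chars.isspace ' ' then (w, false)
            else if !inw then (w + 1, true) else (w, inw)).1,
           (if PySem.Chars.isspace ' ' then (w, false)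
            else if !inw then (w + 1, true) else (w, inw)).2,
           (if decide (' ' ≠ PySem.Chars.lowerChar ' ') then true else cased),
           [], nz || PySem.Set.contains pvNoiseSet (PySem.Chars.lower tok)) := by
        simp [pvStep]
      rw [hstep, ih _ (by simp)]
      simp only
      rw [pvSplit_append_space, pvSplit_of_no_space htok]
      simp [Bool.or_assoc]
    · have hstep : pvStep (w, inw, cased, tok, nz) c =
          ((if PySem.Chars.isspace c then (w, false)
            else if !inw then (w + 1, true) else (w, inw)).1,
           (if PySem.Chars.isspace c then (w, false)
            else if !inw then (w + 1, true) else (w, inw)).2,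
           (if decide (c ≠ PySem.Chars.lowerChar c) then true else cased),
           tok ++ [c], nz) := by
        simp [pvStep, hc]
      have htok' : ' ' ∉ tok ++ [c] := by
        intro h
        rcases List.mem_append.mp h with h | h
        · exact htok h
        · simp at h; exact hc h.symm
      rw [hstep, ih _ htok']
      simp only
      rw [show tok ++ [c] ++ r = tok ++ c :: r by simp]

-- A's padded-substring scan over NOISE_WORDS agrees with B's token-wise check
theorem noise_bridge (s : List Char) :
    (pvNoise.any (fun w => PySem.Chars.isIn (' ' :: w.toList ++ [' '])
        (' ' :: PySem.Chars.lower s ++ [' ']))) =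
      (pvSplit s).any (fun t => PySem.Set.contains pvNoiseSet (PySem.Chars.lower t)) := by
  have hNoise : ∀ w ∈ pvNoise, ' ' ∉ w.toList := by decide
  rw [Bool.eq_iff_iff, List.any_eq_true, List.any_eq_true]
  constructor
  · rintro ⟨w, hw, hin⟩
    have hmem : w.toList ∈ pvSplit (PySem.Chars.lower s) :=
      (isIn_padded_iff (hNoise w hw)).mp hin
    rw [pvSplit_lower] at hmem
    obtain ⟨t, ht, hteq⟩ := List.mem_map.mp hmem
    refine ⟨t, ht, ?_⟩
    rw [PySem.Set.contains_iff, pvNoiseSet, PySem.Set.mem_ofList, hteq]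
    exact List.mem_map_of_mem hw
  · rintro ⟨t, ht, hin⟩
    rw [PySem.Set.contains_iff, pvNoiseSet, PySem.Set.mem_ofList] at hin
    obtain ⟨w, hw, hweq⟩ := List.mem_map.mp hin
    refine ⟨w, hw, (isIn_padded_iff (hNoise w hw)).mpr ?_⟩
    rw [pvSplit_lower]
    exact hweq ▸ List.mem_map_of_mem ht

-- ===== VERDICT (by name: the statement is the Claim_ definition above) =====
theorem looks_like_name_spec : Claim_equal_looks_like_name := by
  intro name _
  show looks_like_name name = looks_like_name_alt name
  unfold looks_like_name looks_like_name_alt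
  rcases hs : name.toList with _ | ⟨c, rest⟩
  · rfl
  · simp only [List.isEmpty_cons, Bool.false_or]
    by_cases hlen : (decide ((c :: rest).length < 2) || decide ((c :: rest).length > 80)) = true
    · have hB : (!(decide (2 ≤ (c :: rest).length) && decide ((c :: rest).length ≤ 80))) = true := by
        simp at hlen ⊢; omega
      rw [if_pos hlen, if_pos hB]
    · have hB : ¬(!(decide (2 ≤ (c :: rest).length) && decide ((c :: rest).length ≤ 80))) = true := by
        simp at hlen ⊢; omega
      rw [if_neg hlen, if_neg hB]
      have hfirst : (match PySem.List.pyGet? (c :: rest) 0 with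
          | some c => PySem.Chars.isupper c || PySem.Chars.isdigit c
          | none => false) = (PySem.Chars.isupper c || PySem.Chars.isdigit c) := by
        simp [PySem.List.pyGet?, PySem.List.pyIdx?]
      have hwords := fold_words (c :: rest) (0, false, false, [], false)
      have hcased := fold_cased (c :: rest) (0, false, false, [], false)
      have hnoise := fold_noise (c :: rest) (0, false, false, [], false) (by simp)
      simp only [List.nil_append, Bool.false_or] at hwords hcased hnoise
      rw [noise_bridge]
      by_cases hN : ((pvSplit (c :: rest)).any
          (fun t => PySem.Set.contains pvNoiseSet (PySem.Chars.lower t))) = true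
      · rw [if_pos hN, hfirst]
        rw [hN] at hnoise
        rw [hnoise]
        simp
      · rw [if_neg hN]
        simp only [Bool.not_eq_true] at hN
        rw [hN] at hnoise
        rw [hfirst, hwords, hcased, cased_iff, hnoise]
        by_cases hC : (PySem.Chars.isupper c || PySem.Chars.isdigit c) = true
        · rw [hC]
          by_cases hL : (decide ((c :: rest) = PySem.Chars.lower (c :: rest))) = true
          · rw [if_pos hL]
            simp [hL]
          · rw [if_neg hL]
            simp only [Bool.not_eq_true] at hL
            by_cases hW : (decide ((PySem.Chars.split₀ (c :: rest)).length > 4)) = true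
            · rw [if_pos hW]
              rw [split₀_length] at hW
              simp at hW
              simp [hL]
              omega
            · rw [if_neg hW]
              rw [split₀_length] at hW
              simp at hW
              simp [hL]
              omega
        · rw [if_pos (by simp_all)]
          simp only [Bool.not_eq_true] at hC
          simp [hC]
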